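-- pv_equiv track=rewrite | github.com/remi-or/Flowtree | core/flowtree.py | compute_marginals
-- ===== SOURCE A (Python) =====
-- def compute_marginals(flow):
--     marginals = [{}, {}]
--     for i in range(2):
--         for k, amount in flow.items():
--             if k[i] in marginals[i]:
--                 marginals[i][k[i]] += amount
--             else:
--                 marginals[i][k[i]] = amount
--     return marginals
-- ===== SOURCE B (Python) =====
-- def compute_marginals(flow):
--     m0, m1 = {}, {}
--     for (a, b), amount in flow.items():
--         m0[a] = m0.get(a, 0) + amount
--         m1[b] = m1.get(b, 0) + amount
--     return [m0, m1]
-- ===== Notes on version B (the rewrite author's own statement) =====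
-- stated objective: simpler
-- what changed: One single pass over flow updating both marginal dicts at once with a get-default accumulation, instead of A's two full scans (one per axis) with an if-in/else branch.
import Mathlib
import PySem

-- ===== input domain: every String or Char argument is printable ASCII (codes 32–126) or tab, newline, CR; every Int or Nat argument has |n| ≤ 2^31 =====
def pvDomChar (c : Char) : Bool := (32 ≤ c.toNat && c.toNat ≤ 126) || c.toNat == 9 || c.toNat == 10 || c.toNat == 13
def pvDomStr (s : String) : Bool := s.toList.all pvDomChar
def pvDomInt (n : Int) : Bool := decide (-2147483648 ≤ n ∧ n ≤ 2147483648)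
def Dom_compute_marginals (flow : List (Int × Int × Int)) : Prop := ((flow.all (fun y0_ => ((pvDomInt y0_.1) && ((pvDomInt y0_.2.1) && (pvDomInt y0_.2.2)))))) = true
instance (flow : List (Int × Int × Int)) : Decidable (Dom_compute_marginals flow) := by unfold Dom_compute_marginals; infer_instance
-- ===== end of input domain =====

-- B makes one single pass over flow updating both marginal dicts at once (get-default
-- accumulation), instead of A's two full scans of flow, one per axis.

-- ===== PORT A =====
-- inner loop body: 'if k[i] in marginals[i]: marginals[i][k[i]] += amount else: marginals[i][k[i]] = amount'
def cmStepA (i : Int) (ms : List (PySem.Dict Int Int)) (kva : Int × Int × Int) : List (PySem.Dict Int Int) :=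
  let ki : Int := if i = 0 then kva.1 else kva.2.1
  let d := (ms[i.toNat]?).getD PySem.Dict.empty
  ms.set i.toNat (if d.contains ki then d.insert ki (d.getD ki 0 + kva.2.2) else d.insert ki kva.2.2)

def compute_marginals (flow : List (Int × Int × Int)) : List (List (Int × Int)) :=
  let marginals : List (PySem.Dict Int Int) := [PySem.Dict.empty, PySem.Dict.empty]
  let marginals := (PySem.List.pyRange 0 2 1).foldl (fun ms i => flow.foldl (cmStepA i) ms) marginals
  marginals.map (fun d => d.items)

-- ===== PORT B =====
-- 'm[k] = m.get(k, 0) + amount'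
def cmBump (d : PySem.Dict Int Int) (k a : Int) : PySem.Dict Int Int :=
  d.insert k (d.getD k 0 + a)

def compute_marginals_alt (flow : List (Int × Int × Int)) : List (List (Int × Int)) :=
  let p := flow.foldl
    (fun p kva => (cmBump p.1 kva.1 kva.2.2, cmBump p.2 kva.2.1 kva.2.2))
    (PySem.Dict.empty, PySem.Dict.empty)
  [p.1.items, p.2.items]

-- ===== PRECONDITION & SPEC =====
def Spec_compute_marginals (flow : List (Int × Int × Int)) (out : List (List (Int × Int))) : Prop := out = compute_marginals_alt flow
instance (flow : List (Int × Int × Int)) (out : List (List (Int × Int))) : Decidable (Spec_compute_marginals flow out) := by unfold Spec_compute_marginals; infer_instance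

-- ===== CLAIM (what is proved, stated in full; the proofs are below) =====
def Claim_equal_compute_marginals : Prop := ∀ (flow : List (Int × Int × Int)), Dom_compute_marginals flow → Spec_compute_marginals flow (compute_marginals flow)

-- ===== LEMMAS AND PROOFS =====

-- A's inner pass for i = 0 touches only the first dict of the two-element state.
theorem cmA_pass0 (flow : List (Int × Int × Int)) (d0 d1 : PySem.Dict Int Int) :
    flow.foldl (cmStepA 0) [d0, d1] =
      [flow.foldl (fun d kva => if d.contains kva.1 then d.insert kva.1 (d.getD kva.1 0 + kva.2.2) else d.insert kva.1 kva.2.2) d0, d1] := by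
  induction flow generalizing d0 with
  | nil => rfl
  | cons kva rest ih => simpa [cmStepA] using ih _

-- A's inner pass for i = 1 touches only the second dict.
theorem cmA_pass1 (flow : List (Int × Int × Int)) (d0 d1 : PySem.Dict Int Int) :
    flow.foldl (cmStepA 1) [d0, d1] =
      [d0, flow.foldl (fun d kva => if d.contains kva.2.1 then d.insert kva.2.1 (d.getD kva.2.1 0 + kva.2.2) else d.insert kva.2.1 kva.2.2) d1] := by
  induction flow generalizing d1 with
  | nil => rfl
  | cons kva rest ih => simpa [cmStepA] using ih _

-- A's if-in/else update equals B's get-default accumulation.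
theorem cmStep_eq_bump (d : PySem.Dict Int Int) (k a : Int) :
    (if d.contains k then d.insert k (d.getD k 0 + a) else d.insert k a) = cmBump d k a := by
  by_cases h : d.contains k = true
  · simp [h, cmBump]
  · simp only [Bool.not_eq_true] at h
    simp [h, cmBump, PySem.Dict.getD_of_not_contains d 0 h]

-- B's paired fold splits into two independent folds.
theorem cmB_split (flow : List (Int × Int × Int)) (p : PySem.Dict Int Int × PySem.Dict Int Int) :
    flow.foldl (fun p kva => (cmBump p.1 kva.1 kva.2.2, cmBump p.2 kva.2.1 kva.2.2)) p =
      (flow.foldl (fun d kva => cmBump d kva.1 kva.2.2) p.1,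
       flow.foldl (fun d kva => cmBump d kva.2.1 kva.2.2) p.2) := by
  induction flow generalizing p with
  | nil => rfl
  | cons kva rest ih => exact ih _

-- ===== VERDICT (by name: the statement is the Claim_ definition above) =====
theorem compute_marginals_spec : Claim_equal_compute_marginals := by
  intro flow _
  show compute_marginals flow = compute_marginals_alt flow
  have h2 : PySem.List.pyRange 0 2 1 = [0, 1] := by decide
  simp only [compute_marginals, compute_marginals_alt, h2, List.foldl_cons, List.foldl_nil,
    cmB_split]
  rw [cmA_pass0, cmA_pass1]
  simp only [funext fun d => funext fun kva : Int × Int × Int => cmStep_eq_bump d kva.1 kva.2.2,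
    funext fun d => funext fun kva : Int × Int × Int => cmStep_eq_bump d kva.2.1 kva.2.2]
  simp [List.map]
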